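-- pv_equiv track=rewrite | github.com/hellowydwyd/whisper-hallucination-research | src/utils/metrics.py | check_boh_match
-- ===== SOURCE A (Python) =====
-- from typing import List, Dict, Any, Optional
--
-- def check_boh_match(
--     text: str,
--     boh_phrases: List[str]
-- ) -> List[str]:
--     """
--     检查文本是否包含 BoH (Bag of Hallucinations) 中的短语
--
--     Args:
--         text: 输入文本
--         boh_phrases: 幻觉短语列表
--
--     Returns:
--         匹配到的幻觉短语列表
--     """
--     text_lower = text.lower()
--     matches = []
--
--     for phrase in boh_phrases:
--         if phrase.lower() in text_lower:
--             matches.append(phrase)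
--
--     return matches
-- ===== SOURCE B (Python) =====
-- def check_boh_match(text, boh_phrases):
--     # Multi-pattern search by length groups: lower everything once, group the
--     # distinct lowered phrases by length, slide a window of each occurring
--     # length over the text collecting the windows that are phrases, then
--     # filter the original list by that matched set, preserving order.
--     t = text.lower()
--     patterns = set(p.lower() for p in boh_phrases)
--     lengths = sorted({len(q) for q in patterns})
--     n = len(t)
--     matched = set()
--     for L in lengths:
--         group = {q for q in patterns if len(q) == L}
--         for i in range(n - L + 1):
--             w = t[i:i + L]
--             if w in group:
--                 matched.add(w)
--     return [p for p in boh_phrases if p.lower() in matched]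
-- ===== Notes on version B (the rewrite author's own statement) =====
-- stated objective: faster
-- what changed: B replaces A's per-phrase substring search over the whole text by a length-grouped sliding-window scan: it lowers everything once, groups the distinct lowered phrases by length, slides a window of each occurring length over the text collecting the windows that are phrases, and finally filters the original phrase list by that matched set.
import Mathlib
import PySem

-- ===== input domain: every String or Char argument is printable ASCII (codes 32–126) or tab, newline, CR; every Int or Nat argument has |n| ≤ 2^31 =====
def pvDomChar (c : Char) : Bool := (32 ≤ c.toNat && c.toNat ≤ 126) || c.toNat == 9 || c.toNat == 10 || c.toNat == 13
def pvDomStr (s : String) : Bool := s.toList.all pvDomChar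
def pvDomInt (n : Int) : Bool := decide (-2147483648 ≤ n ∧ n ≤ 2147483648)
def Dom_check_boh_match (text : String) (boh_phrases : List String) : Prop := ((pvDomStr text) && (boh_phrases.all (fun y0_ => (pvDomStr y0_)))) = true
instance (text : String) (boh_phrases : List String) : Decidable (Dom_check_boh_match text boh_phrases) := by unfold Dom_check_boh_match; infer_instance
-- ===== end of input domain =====

-- B replaces A's per-phrase substring search by a length-grouped sliding-window scan: lower once,
-- group the distinct lowered phrases by length, slide a window of each occurring length over the
-- text collecting windows that are phrases, then filter the original list by the matched set.


-- ===== PORT A =====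
def check_boh_match (text : String) (boh_phrases : List String) : List String :=
  let text_lower := PySem.Str.lower text
  boh_phrases.foldl
    (fun ms phrase =>
      if PySem.Str.isIn (PySem.Str.lower phrase) text_lower then ms ++ [phrase] else ms)
    []

-- ===== PORT B =====
-- inner loop of Source B for one length L: for i in range(n - L + 1): w = t[i:i+L]; if w in group: matched.add(w)
-- (range(n - L + 1) over Python ints is empty when L > n, hence the explicit count)
def bohWinPass (t : List Char) (L : Nat) (group : List (List Char))
    (m : PySem.Set (List Char)) : PySem.Set (List Char) :=
  (List.range (if L ≤ t.length then t.length - L + 1 else 0)).foldl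
    (fun (m : PySem.Set (List Char)) (i : Nat) =>
      let w := PySem.List.slice t (some (i : Int)) (some ((i : Int) + (L : Int)))
      if PySem.Set.contains group w then PySem.Set.add m w else m)
    m

def check_boh_match_alt (text : String) (boh_phrases : List String) : List String :=
  let t := (PySem.Str.lower text).toList
  -- set(p.lower() for p in boh_phrases)
  let patterns : PySem.Set (List Char) :=
    PySem.Set.ofList (boh_phrases.map (fun p => (PySem.Str.lower p).toList))
  -- sorted({len(q) for q in patterns})
  let lengths := PySem.List.sorted (PySem.Set.ofList (patterns.map List.length)) (fun x => x) false
  -- {q for q in patterns if len(q) == L} is consumed by membership only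
  let matched := lengths.foldl
    (fun m L => bohWinPass t L (patterns.filter (fun q => q.length == L)) m)
    PySem.Set.empty
  boh_phrases.filter (fun p => PySem.Set.contains matched (PySem.Str.lower p).toList)

-- ===== PRECONDITION & SPEC =====
def Spec_check_boh_match (text : String) (boh_phrases : List String) (out : List String) : Prop := out = check_boh_match_alt text boh_phrases
instance (text : String) (boh_phrases : List String) (out : List String) : Decidable (Spec_check_boh_match text boh_phrases out) := by unfold Spec_check_boh_match; infer_instance

-- ===== CLAIM (what is proved, stated in full; the proofs are below) =====
def Claim_equal_check_boh_match : Prop := ∀ (text : String) (boh_phrases : List String), Dom_check_boh_match text boh_phrases → Spec_check_boh_match text boh_phrases (check_boh_match text boh_phrases)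

-- ===== LEMMAS AND PROOFS =====

-- membership after the window loop body over any position list: already matched,
-- or a window that lies in the group
theorem bohWin_mem (t : List Char) (L : Nat) (group : List (List Char)) (q : List Char) :
    ∀ (is : List Nat) (m : PySem.Set (List Char)),
      q ∈ is.foldl
          (fun (m : PySem.Set (List Char)) (i : Nat) =>
            let w := PySem.List.slice t (some (i : Int)) (some ((i : Int) + (L : Int)))
            if PySem.Set.contains group w then PySem.Set.add m w else m)
          m ↔
        q ∈ m ∨ ∃ i ∈ is,
          PySem.List.slice t (some (i : Int)) (some ((i : Int) + (L : Int))) = q ∧ q ∈ group := by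
  intro is
  induction is with
  | nil => intro m; simp
  | cons j is ih =>
    intro m
    simp only [List.foldl_cons]
    rw [ih]
    by_cases hw : PySem.Set.contains group
        (PySem.List.slice t (some (j : Int)) (some ((j : Int) + (L : Int)))) = true
    · simp only [hw, if_true]
      rw [PySem.Set.mem_add]
      constructor
      · rintro ((h | rfl) | ⟨i, hi, hwi, hg⟩)
        · exact Or.inl h
        · exact Or.inr ⟨j, List.mem_cons_self, rfl, (PySem.Set.contains_iff _ _).mp hw⟩
        · exact Or.inr ⟨i, List.mem_cons_of_mem _ hi, hwi, hg⟩
      · rintro (h | ⟨i, hi, hwi, hg⟩)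
        · exact Or.inl (Or.inl h)
        · rcases List.mem_cons.mp hi with rfl | hi
          · exact Or.inl (Or.inr hwi.symm)
          · exact Or.inr ⟨i, hi, hwi, hg⟩
    · simp only [hw, Bool.false_eq_true, if_false]
      constructor
      · rintro (h | ⟨i, hi, hwi, hg⟩)
        · exact Or.inl h
        · exact Or.inr ⟨i, List.mem_cons_of_mem _ hi, hwi, hg⟩
      · rintro (h | ⟨i, hi, hwi, hg⟩)
        · exact Or.inl h
        · rcases List.mem_cons.mp hi with rfl | hi
          · exact absurd ((PySem.Set.contains_iff _ _).mpr (hwi ▸ hg)) hw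
          · exact Or.inr ⟨i, hi, hwi, hg⟩

-- membership after the whole loop over the length groups
theorem bohScan_mem (t : List Char) (patterns : List (List Char)) (q : List Char) :
    ∀ (Ls : List Nat) (m : PySem.Set (List Char)),
      q ∈ Ls.foldl
          (fun m L => bohWinPass t L (patterns.filter (fun q => q.length == L)) m) m ↔
        q ∈ m ∨ ∃ L ∈ Ls, ∃ i ∈ List.range (if L ≤ t.length then t.length - L + 1 else 0),
          PySem.List.slice t (some (i : Int)) (some ((i : Int) + (L : Int))) = q ∧
            q ∈ patterns.filter (fun q => q.length == L) := by
  intro Ls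
  induction Ls with
  | nil => intro m; simp
  | cons L Ls ih =>
    intro m
    simp only [List.foldl_cons]
    rw [ih]
    unfold bohWinPass
    rw [bohWin_mem]
    constructor
    · rintro ((h | ⟨i, hi, hwi, hg⟩) | ⟨L', hL', rest⟩)
      · exact Or.inl h
      · exact Or.inr ⟨L, List.mem_cons_self, i, hi, hwi, hg⟩
      · exact Or.inr ⟨L', List.mem_cons_of_mem _ hL', rest⟩
    · rintro (h | ⟨L', hL', i, hi, hwi, hg⟩)
      · exact Or.inl (Or.inl h)
      · rcases List.mem_cons.mp hL' with rfl | hL'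
        · exact Or.inl (Or.inr ⟨i, hi, hwi, hg⟩)
        · exact Or.inr ⟨L', hL', i, hi, hwi, hg⟩

-- a pattern q equals some window of its own length iff it is a substring of t
theorem exists_window_iff_isIn (t q : List Char) :
    (∃ i ∈ List.range (if q.length ≤ t.length then t.length - q.length + 1 else 0),
        PySem.List.slice t (some (i : Int)) (some ((i : Int) + (q.length : Int))) = q) ↔
      PySem.Chars.isIn q t = true := by
  rw [← PySem.Chars.exists_prefix_drop_iff_isIn]
  constructor
  · rintro ⟨i, _, hw⟩
    refine ⟨i, ?_⟩
    rw [PySem.List.slice_natCast_add] at hw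
    exact hw ▸ List.take_prefix _ _
  · rintro ⟨j, hj⟩
    rcases eq_or_ne q [] with rfl | hq
    · refine ⟨0, List.mem_range.mpr (by simp), ?_⟩
      rw [PySem.List.slice_natCast_add]
      simp
    · have hlen : q.length ≤ (t.drop j).length := hj.length_le
      rw [List.length_drop] at hlen
      have hqpos : 0 < q.length := List.length_pos_iff.mpr hq
      have hjle : j ≤ t.length - q.length := by omega
      have hLle : q.length ≤ t.length := by omega
      refine ⟨j, List.mem_range.mpr (by rw [if_pos hLle]; omega), ?_⟩
      rw [PySem.List.slice_natCast_add]
      exact (List.prefix_iff_eq_take.mp hj).symm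

-- ===== VERDICT (by name: the statement is the Claim_ definition above) =====
theorem check_boh_match_spec : Claim_equal_check_boh_match := by
  intro text boh_phrases _
  unfold Spec_check_boh_match check_boh_match check_boh_match_alt
  rw [PySem.List.foldl_append_if]
  simp only [List.nil_append, List.map_id']
  apply List.filter_congr
  intro p hp
  set t := (PySem.Str.lower text).toList with ht
  set patterns := PySem.Set.ofList (boh_phrases.map (fun p => (PySem.Str.lower p).toList)) with hpat
  set ql := (PySem.Str.lower p).toList with hql
  have hqmem : ql ∈ patterns := by
    rw [hpat, PySem.Set.mem_ofList]
    exact List.mem_map.mpr ⟨p, hp, rfl⟩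
  have hiff :
      PySem.Set.contains
        ((PySem.List.sorted (PySem.Set.ofList (patterns.map List.length)) (fun x => x) false).foldl
          (fun m L => bohWinPass t L (patterns.filter (fun q => q.length == L)) m)
          PySem.Set.empty) ql = true ↔
      PySem.Str.isIn (PySem.Str.lower p) (PySem.Str.lower text) = true := by
    rw [PySem.Set.contains_iff, bohScan_mem, PySem.Str.isIn_eq, ← hql, ← ht]
    constructor
    · rintro (h | ⟨L, _, i, hi, hwi, hg⟩)
      · simp [PySem.Set.empty] at h
      · have hLq : ql.length = L := by
          have := List.mem_filter.mp hg
          simpa using this.2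
        exact (exists_window_iff_isIn t ql).mp ⟨i, hLq ▸ hi, hLq ▸ hwi⟩
    · intro h
      obtain ⟨i, hi, hwi⟩ := (exists_window_iff_isIn t ql).mpr h
      refine Or.inr ⟨ql.length, ?_, i, hi, hwi, ?_⟩
      · rw [PySem.List.mem_sorted, PySem.Set.mem_ofList]
        exact List.mem_map.mpr ⟨ql, hqmem, rfl⟩
      · exact List.mem_filter.mpr ⟨hqmem, by simp⟩
  cases hA : PySem.Str.isIn (PySem.Str.lower p) (PySem.Str.lower text) with
  | true => simp only [hiff.mpr hA]
  | false =>
    cases hB : PySem.Set.contains _ ql with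
    | false => rfl
    | true => rw [hiff.mp hB] at hA; cases hA
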